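-- pv_equiv track=rewrite | github.com/geopandas/dask-geopandas | dask_geopandas/hilbert_distance.py | _binary_2_int
-- ===== SOURCE A (Python) =====
-- def _binary_2_int(bin_vec):
--
--     """
--     Convert binary byte to int
--
--     Based on: https://github.com/holoviz/spatialpandas/blob/
--     9252a7aba5f8bc7a435fffa2c31018af8d92942c/spatialpandas/spatialindex/hilbert_curve.py#L23
--
--     Parameters
--     ----------
--     p     : Hilbert curve param
--
--     coord : Array of coordinates
--
--     Returns
--     ---------
--     # Returns discrete int
--     """
--
--     res = 0
--     next_val = 1
--     width = len(bin_vec)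
--     for i in range(width):
--         res += next_val * bin_vec[width - i - 1]
--         next_val <<= 1
--     return res
-- ===== SOURCE B (Python) =====
-- def _binary_2_int(bin_vec):
--     # Horner's rule, MSB-first: one accumulator, no separate power-of-two register.
--     res = 0
--     for bit in bin_vec:
--         res = res * 2 + bit
--     return res
-- ===== Notes on version B (the rewrite author's own statement) =====
-- stated objective: simpler
-- what changed: Replaces the backward indexed scan with a separate power-of-two register (res += next_val * bin_vec[width-i-1]; next_val <<= 1) by a forward Horner's-rule fold res = res*2 + bit over the elements, dropping the index arithmetic and the extra register.
import Mathlib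
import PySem

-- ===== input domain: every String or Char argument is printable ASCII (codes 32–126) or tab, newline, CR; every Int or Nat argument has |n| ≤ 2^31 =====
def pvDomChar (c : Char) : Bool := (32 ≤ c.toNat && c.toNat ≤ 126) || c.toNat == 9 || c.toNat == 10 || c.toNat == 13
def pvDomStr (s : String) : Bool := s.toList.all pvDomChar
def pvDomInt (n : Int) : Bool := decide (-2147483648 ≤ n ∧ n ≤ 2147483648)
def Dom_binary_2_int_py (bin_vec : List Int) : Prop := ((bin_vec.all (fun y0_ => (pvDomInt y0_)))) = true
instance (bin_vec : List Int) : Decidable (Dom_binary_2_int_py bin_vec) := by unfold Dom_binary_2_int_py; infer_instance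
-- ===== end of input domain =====

-- B replaces A's backward indexed scan with a power-of-two register by a forward Horner fold (simpler decomposition).


-- ===== PORT A =====
-- width = len(bin_vec) is inlined; otherwise line for line A's loop (res, next_val) state pair.
def binary_2_int_py (bin_vec : List Int) : Int :=
  ((PySem.List.pyRange 0 (bin_vec.length : Int) 1).foldl
    (fun (st : Int × Int) i =>
      (st.1 + st.2 * PySem.List.pyGetD bin_vec ((bin_vec.length : Int) - i - 1) 0, st.2 * 2))
    (0, 1)).1

-- ===== PORT B =====
def binary_2_int_py_alt (bin_vec : List Int) : Int :=
  bin_vec.foldl (fun res bit => res * 2 + bit) 0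

-- ===== PRECONDITION & SPEC =====
def Spec_binary_2_int_py (bin_vec : List Int) (out : Int) : Prop := out = binary_2_int_py_alt bin_vec
instance (bin_vec : List Int) (out : Int) : Decidable (Spec_binary_2_int_py bin_vec out) := by unfold Spec_binary_2_int_py; infer_instance

-- ===== CLAIM (what is proved, stated in full; the proofs are below) =====
def Claim_equal_binary_2_int_py : Prop := ∀ (bin_vec : List Int), Dom_binary_2_int_py bin_vec → Spec_binary_2_int_py bin_vec (binary_2_int_py bin_vec)

-- ===== LEMMAS AND PROOFS =====

/-- LSB-first value of a bit list: the common meeting point of the two loops. -/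
def pvLsb : List Int → Int
  | [] => 0
  | x :: xs => x + 2 * pvLsb xs

theorem pvLsb_append_singleton (ys : List Int) (x : Int) :
    pvLsb (ys ++ [x]) = pvLsb ys + x * 2 ^ ys.length := by
  induction ys with
  | nil => simp [pvLsb]
  | cons y ys ih => simp [pvLsb, ih]; ring

/-- A's loop body over any element list computes r + p * (LSB-first value). -/
theorem pvFoldA (ys : List Int) : ∀ r p : Int,
    ((ys.foldl (fun (st : Int × Int) b => (st.1 + st.2 * b, st.2 * 2)) (r, p)).1)
      = r + p * pvLsb ys := by
  induction ys with
  | nil => intro r p; simp [pvLsb]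
  | cons y ys ih => intro r p; simp only [List.foldl_cons, ih, pvLsb]; ring

/-- B's Horner fold equals the LSB-first value of the reversed list. -/
theorem pvFoldB (xs : List Int) : ∀ a : Int,
    xs.foldl (fun res bit => res * 2 + bit) a = a * 2 ^ xs.length + pvLsb xs.reverse := by
  induction xs with
  | nil => intro a; simp [pvLsb]
  | cons x xs ih =>
    intro a
    simp only [List.foldl_cons, ih, List.reverse_cons, pvLsb_append_singleton,
      List.length_reverse, List.length_cons]
    ring

-- ===== VERDICT (by name: the statement is the Claim_ definition above) =====
theorem binary_2_int_py_spec : Claim_equal_binary_2_int_py := by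
  intro xs _
  show binary_2_int_py xs = binary_2_int_py_alt xs
  unfold binary_2_int_py binary_2_int_py_alt
  have hc := PySem.List.foldl_congr_mem
    (PySem.List.pyRange 0 (xs.length : Int) 1)
    (fun (st : Int × Int) i =>
      (st.1 + st.2 * PySem.List.pyGetD xs ((xs.length : Int) - i - 1) 0, st.2 * 2))
    (fun (st : Int × Int) i =>
      (st.1 + st.2 * PySem.List.pyGetD xs.reverse i 0, st.2 * 2))
    (0, 1)
    (by
      intro acc i hi
      rcases (PySem.List.mem_pyRange_one).1 hi with ⟨h0, h1⟩
      have hrl : i < (xs.reverse.length : Int) := by simpa using h1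
      dsimp only
      rw [PySem.List.pyGetD_eq_getElem xs 0 (by omega) (by omega),
          PySem.List.pyGetD_eq_getElem xs.reverse 0 h0 hrl]
      rw [List.getElem_reverse]
      have hidx : ((xs.length : Int) - i - 1).toNat = xs.length - 1 - i.toNat := by omega
      simp only [hidx])
  rw [hc]
  have hlen : ((xs.length : Int)) = ((xs.reverse.length : Int)) := by simp
  rw [hlen, PySem.List.foldl_pyRange_zero_pyGetD' xs.reverse 0
      (fun (st : Int × Int) b => (st.1 + st.2 * b, st.2 * 2)) (0, 1)]
  rw [pvFoldA, pvFoldB]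
  ring
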